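-- pv_equiv track=rewrite | github.com/awslabs/open-hostfactory-plugin | src/cli/formatters.py | format_machines_table
-- ===== SOURCE A (Python) =====
-- from typing import Any, Dict, List
--
-- def get_field_value(data_dict: Dict[str, Any], field_mapping: Dict[str, List[str]], field_key: str, default: str = 'N/A') -> str:
--     """
--     Get field value from data dictionary using field mapping.
--
--     Args:
--         data_dict: Dictionary containing the data
--         field_mapping: Mapping of logical field names to possible actual field names
--         field_key: Logical field name to look up
--         default: Default value if field not found
--
--     Returns:
--         Field value as string, or default if not found
--     """
--     possible_names = field_mapping.get(field_key, [field_key])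
--
--     for name in possible_names:
--         if name in data_dict:
--             value = data_dict[name]
--             return str(value) if value is not None else default
--
--     return default
--
-- def get_machine_field_mapping() -> Dict[str, List[str]]:
--     """Get mapping of logical machine field names to possible actual field names."""
--     return {
--         'id': ['machine_id', 'machineId', 'instance_id', 'instanceId'],
--         'name': ['name', 'machine_name', 'machineName'],
--         'status': ['status', 'state'],
--         'instance_type': ['instance_type', 'instanceType', 'vm_type', 'vmType'],
--         'private_ip': ['private_ip', 'privateIp', 'private_ip_address'],
--         'public_ip': ['public_ip', 'publicIp', 'public_ip_address'],
--         'created_at': ['created_at', 'createdAt', 'launch_time'],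
--         'template_id': ['template_id', 'templateId']
--     }
--
-- def format_machines_table(machines: List[Dict]) -> str:
--     """Format machines as a table."""
--     if not machines:
--         return "No machines found."
--
--     field_mapping = get_machine_field_mapping()
--
--     # Define table headers
--     headers = ['ID', 'Name', 'Status', 'Type', 'Private IP']
--
--     # Extract data for each machine
--     rows = []
--     for machine in machines:
--         machine_id = get_field_value(machine, field_mapping, 'id')
--         name = get_field_value(machine, field_mapping, 'name')
--         status = get_field_value(machine, field_mapping, 'status')
--         instance_type = get_field_value(machine, field_mapping, 'instance_type')
--         private_ip = get_field_value(machine, field_mapping, 'private_ip')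
--
--         # Truncate long values for table display
--         row = [
--             machine_id[:15],
--             name[:15] if name != 'N/A' else name,
--             status[:10],
--             instance_type[:10],
--             private_ip
--         ]
--         rows.append(row)
--
--     return _format_table_with_headers(headers, rows)
--
-- def _format_table_with_headers(headers: List[str], rows: List[List[str]]) -> str:
--     """Format data as ASCII table with headers."""
--     if not rows:
--         return "No data to display."
--
--     # Calculate column widths
--     all_rows = [headers] + rows
--     widths = [max(len(str(row[i])) for row in all_rows) for i in range(len(headers))]
--
--     # Format table
--     def format_row(row, widths):
--         return '| ' + ' | '.join(str(row[i]).ljust(widths[i]) for i in range(len(row))) + ' |'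
--
--     def format_separator(widths):
--         return '+' + '+'.join('-' * (w + 2) for w in widths) + '+'
--
--     lines = []
--     lines.append(format_separator(widths))
--     lines.append(format_row(headers, widths))
--     lines.append(format_separator(widths))
--     for row in rows:
--         lines.append(format_row(row, widths))
--     lines.append(format_separator(widths))
--
--     return "\n".join(lines)
-- ===== SOURCE B (Python) =====
-- from typing import Dict, List
--
-- _SPECS = [
--     ('ID', ['machine_id', 'machineId', 'instance_id', 'instanceId'], 15, False),
--     ('Name', ['name', 'machine_name', 'machineName'], 15, True),
--     ('Status', ['status', 'state'], 10, False),
--     ('Type', ['instance_type', 'instanceType', 'vm_type', 'vmType'], 10, False),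
--     ('Private IP', ['private_ip', 'privateIp', 'private_ip_address'], None, False),
-- ]
--
-- def _cell(machine, aliases, cut, keep_na):
--     value = next((machine[a] for a in aliases if a in machine), None)
--     text = 'N/A' if value is None else str(value)
--     if cut is None or (keep_na and text == 'N/A'):
--         return text
--     return text[:cut]
--
-- def format_machines_table(machines: List[Dict]) -> str:
--     """Column-major construction: build each fully padded column, then stitch lines."""
--     if not machines:
--         return "No machines found."
--     padded_cols, dashes = [], []
--     for header, aliases, cut, keep_na in _SPECS:
--         cells = [_cell(m, aliases, cut, keep_na) for m in machines]
--         width = max(len(header), max(len(c) for c in cells))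
--         padded_cols.append([header.ljust(width)] + [c.ljust(width) for c in cells])
--         dashes.append('-' * (width + 2))
--     sep = '+' + '+'.join(dashes) + '+'
--     lines = ['| ' + ' | '.join(col[i] for col in padded_cols) + ' |'
--              for i in range(len(machines) + 1)]
--     return "\n".join([sep, lines[0], sep] + lines[1:] + [sep])
-- ===== Notes on version B (the rewrite author's own statement) =====
-- stated objective: alternative
-- what changed: B builds the table column-major from a declarative spec table: for each of the five column specs it extracts that column's cells across all machines (first-alias hit via next()), pads the whole column to its width up front, and finally stitches the output lines together by row index with a plain join; A is row-major, extracting one row per machine via get_field_value, then rescanning all rows per column for widths and ljust-ing at format time.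
import Mathlib
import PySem

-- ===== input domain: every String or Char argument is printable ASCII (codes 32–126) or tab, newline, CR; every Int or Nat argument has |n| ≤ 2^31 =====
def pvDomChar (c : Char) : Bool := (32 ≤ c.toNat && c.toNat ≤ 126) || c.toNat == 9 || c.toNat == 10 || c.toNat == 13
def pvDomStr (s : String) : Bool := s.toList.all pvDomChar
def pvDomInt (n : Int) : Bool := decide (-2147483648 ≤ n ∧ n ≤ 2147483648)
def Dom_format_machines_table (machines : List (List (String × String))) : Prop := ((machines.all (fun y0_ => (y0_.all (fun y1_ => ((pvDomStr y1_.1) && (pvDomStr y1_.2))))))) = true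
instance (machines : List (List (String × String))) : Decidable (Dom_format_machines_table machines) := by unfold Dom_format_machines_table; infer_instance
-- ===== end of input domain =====

-- B builds the table column-major: for each column spec it extracts all cells, pads the whole
-- column to its width, then stitches the lines together by index; A is row-major with a separate
-- width-scanning pass. Objective: alternative decomposition (same asymptotic cost).

-- s.ljust(w) with the default space fill; pad count is max(w - len s, 0) exactly as in Python
def pvLjust (s : String) (w : Int) : String :=
  s ++ String.ofList (List.replicate (w - PySem.Str.len s).toNat ' ')

-- ===== PORT A =====
-- the for-loop body of get_field_value; values here are String, never None, so str(value) = value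
def pvGfvLoop (data_dict : List (String × String)) : List String → String → String
  | [], default => default
  | n :: rest, default =>
    match (PySem.Dict.mk data_dict).get? n with   -- 'if name in data_dict: value = data_dict[name]'
    | some v => v
    | none => pvGfvLoop data_dict rest default

def get_field_value (data_dict : List (String × String)) (field_mapping : PySem.Dict String (List String)) (field_key : String) (default : String) : String :=
  let possible_names := field_mapping.getD field_key [field_key]
  pvGfvLoop data_dict possible_names default

def get_machine_field_mapping : PySem.Dict String (List String) :=
  PySem.Dict.ofList
    [("id", ["machine_id", "machineId", "instance_id", "instanceId"]),
     ("name", ["name", "machine_name", "machineName"]),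
     ("status", ["status", "state"]),
     ("instance_type", ["instance_type", "instanceType", "vm_type", "vmType"]),
     ("private_ip", ["private_ip", "privateIp", "private_ip_address"]),
     ("public_ip", ["public_ip", "publicIp", "public_ip_address"]),
     ("created_at", ["created_at", "createdAt", "launch_time"]),
     ("template_id", ["template_id", "templateId"])]

-- '| ' + ' | '.join(str(row[i]).ljust(widths[i]) for i in range(len(row))) + ' |'
-- row[i] / widths[i] are always in range here, so getD is exact
def pvFormatRowA (row : List String) (widths : List Int) : String :=
  "| " ++ PySem.Str.join " | " ((List.range row.length).map (fun i => pvLjust (row.getD i "") (widths.getD i 0))) ++ " |"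

-- '+' + '+'.join('-' * (w + 2) for w in widths) + '+'  (w ≥ 0 always, toNat is exact)
def pvFormatSepA (widths : List Int) : String :=
  "+" ++ PySem.Str.join "+" (widths.map (fun w => String.ofList (List.replicate (w + 2).toNat '-'))) ++ "+"

def pvFormatTableWithHeaders (headers : List String) (rows : List (List String)) : String :=
  if rows = [] then "No data to display." else
  let all_rows := headers :: rows
  -- widths[i] = max(len(str(row[i])) for row in all_rows); all_rows is nonempty so max? is some and getD is exact
  let widths := (List.range headers.length).map (fun i =>
    ((PySem.List.max? (all_rows.map (fun row => PySem.Str.len (row.getD i ""))) (fun x => x)).getD 0))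
  PySem.Str.join "\n"
    ([pvFormatSepA widths, pvFormatRowA headers widths, pvFormatSepA widths]
      ++ rows.map (fun row => pvFormatRowA row widths) ++ [pvFormatSepA widths])

-- the body of A's loop over machines: the five get_field_value calls and the truncations
def pvExtractRowA (machine : List (String × String)) : List String :=
  let fm := get_machine_field_mapping
  let machine_id := get_field_value machine fm "id" "N/A"
  let name := get_field_value machine fm "name" "N/A"
  let status := get_field_value machine fm "status" "N/A"
  let instance_type := get_field_value machine fm "instance_type" "N/A"
  let private_ip := get_field_value machine fm "private_ip" "N/A"
  [PySem.Str.slice machine_id none (some 15),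
   if name ≠ "N/A" then PySem.Str.slice name none (some 15) else name,
   PySem.Str.slice status none (some 10),
   PySem.Str.slice instance_type none (some 10),
   private_ip]

def format_machines_table (machines : List (List (String × String))) : String :=
  if machines = [] then "No machines found." else
  let headers := ["ID", "Name", "Status", "Type", "Private IP"]
  let rows := machines.map pvExtractRowA
  pvFormatTableWithHeaders headers rows

-- ===== PORT B =====
-- the _SPECS table: (header, aliases, cut, keep_na)
def pvSpecsB : List (String × List String × Option Int × Bool) :=
  [("ID", (["machine_id", "machineId", "instance_id", "instanceId"], some 15, false)),
   ("Name", (["name", "machine_name", "machineName"], some 15, true)),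
   ("Status", (["status", "state"], some 10, false)),
   ("Type", (["instance_type", "instanceType", "vm_type", "vmType"], some 10, false)),
   ("Private IP", (["private_ip", "privateIp", "private_ip_address"], none, false))]

-- _cell: next((machine[a] for a in aliases if a in machine), None) is the first alias hit;
-- values here are String, never None, so str(value) = value
def pvCellB (machine : List (String × String)) (aliases : List String) (cut : Option Int) (keepNA : Bool) : String :=
  let value := aliases.findSome? (fun a => (PySem.Dict.mk machine).get? a)
  let text := value.getD "N/A"
  match cut with
  | none => text
  | some k => if keepNA && text == "N/A" then text else PySem.Str.slice text none (some k)

-- one iteration of the loop over _SPECS: the padded column and its dash segment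
-- (machines is nonempty where this is called, so max(...) over cells is exact with getD 0)
def pvColB (machines : List (List (String × String))) (spec : String × List String × Option Int × Bool) : List String × String :=
  let cells := machines.map (fun m => pvCellB m spec.2.1 spec.2.2.1 spec.2.2.2)
  let width := max (PySem.Str.len spec.1) ((PySem.List.max? (cells.map PySem.Str.len) (fun x => x)).getD 0)
  (pvLjust spec.1 width :: cells.map (fun c => pvLjust c width),
   String.ofList (List.replicate (width + 2).toNat '-'))

def format_machines_table_alt (machines : List (List (String × String))) : String :=
  if machines = [] then "No machines found." else
  let cols := pvSpecsB.map (pvColB machines)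
  let sep := "+" ++ PySem.Str.join "+" (cols.map (fun col => col.2)) ++ "+"
  -- lines[0] exists (range is nonempty), so getD is exact
  let lines := (List.range (machines.length + 1)).map (fun i =>
    "| " ++ PySem.Str.join " | " (cols.map (fun col => col.1.getD i "")) ++ " |")
  PySem.Str.join "\n" ([sep, lines.getD 0 "", sep] ++ lines.drop 1 ++ [sep])

-- ===== PRECONDITION & SPEC =====
def Spec_format_machines_table (machines : List (List (String × String))) (out : String) : Prop := out = format_machines_table_alt machines
instance (machines : List (List (String × String))) (out : String) : Decidable (Spec_format_machines_table machines out) := by unfold Spec_format_machines_table; infer_instance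

-- ===== CLAIM =====
def Claim_equal_format_machines_table : Prop := ∀ (machines : List (List (String × String))), Dom_format_machines_table machines → Spec_format_machines_table machines (format_machines_table machines)

-- ===== LEMMAS AND PROOFS =====

-- A's alias-search loop with default 'N/A' is B's findSome?-with-default
theorem pvLoop_eq (d : List (String × String)) (names : List String) :
    pvGfvLoop d names "N/A" = (names.findSome? (fun a => (PySem.Dict.mk d).get? a)).getD "N/A" := by
  induction names with
  | nil => rfl
  | cons n rest ih =>
    simp only [pvGfvLoop, List.findSome?]
    cases (PySem.Dict.mk d).get? n with
    | some v => rfl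
    | none => simpa using ih

-- A's extracted row is exactly B's five cells
theorem rowA_eq (m : List (String × String)) :
    pvExtractRowA m =
      [pvCellB m ["machine_id", "machineId", "instance_id", "instanceId"] (some 15) false,
       pvCellB m ["name", "machine_name", "machineName"] (some 15) true,
       pvCellB m ["status", "state"] (some 10) false,
       pvCellB m ["instance_type", "instanceType", "vm_type", "vmType"] (some 10) false,
       pvCellB m ["private_ip", "privateIp", "private_ip_address"] none false] := by
  simp only [pvExtractRowA, get_field_value]
  rw [show get_machine_field_mapping.getD "id" ["id"] = ["machine_id", "machineId", "instance_id", "instanceId"] from rfl,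
      show get_machine_field_mapping.getD "name" ["name"] = ["name", "machine_name", "machineName"] from rfl,
      show get_machine_field_mapping.getD "status" ["status"] = ["status", "state"] from rfl,
      show get_machine_field_mapping.getD "instance_type" ["instance_type"] = ["instance_type", "instanceType", "vm_type", "vmType"] from rfl,
      show get_machine_field_mapping.getD "private_ip" ["private_ip"] = ["private_ip", "privateIp", "private_ip_address"] from rfl]
  simp [pvLoop_eq, pvCellB, ite_not]

theorem pvFoldlMaxAssoc (t : List Int) : ∀ a b : Int, t.foldl max (max a b) = max a (t.foldl max b) := by
  induction t with
  | nil => intro a b; rfl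
  | cons d t ih => intro a b; simp only [List.foldl_cons]; rw [max_assoc, ih]

-- max(x, max(L)) is the fold of max over x :: L
theorem pvMaxCons (x c : Int) (t : List Int) :
    (PySem.List.max? (x :: c :: t) (fun y => y)).getD 0
      = max x ((PySem.List.max? (c :: t) (fun y => y)).getD 0) := by
  rw [PySem.List.max?_id_cons, PySem.List.max?_id_cons]
  simp only [Option.getD_some, List.foldl_cons]
  exact pvFoldlMaxAssoc t x c

theorem pvCell0 (m : List (String × String)) :
    (pvExtractRowA m).getD 0 "" = pvCellB m ["machine_id", "machineId", "instance_id", "instanceId"] (some 15) false := by rw [rowA_eq]; rfl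
theorem pvCell1 (m : List (String × String)) :
    (pvExtractRowA m).getD 1 "" = pvCellB m ["name", "machine_name", "machineName"] (some 15) true := by rw [rowA_eq]; rfl
theorem pvCell2 (m : List (String × String)) :
    (pvExtractRowA m).getD 2 "" = pvCellB m ["status", "state"] (some 10) false := by rw [rowA_eq]; rfl
theorem pvCell3 (m : List (String × String)) :
    (pvExtractRowA m).getD 3 "" = pvCellB m ["instance_type", "instanceType", "vm_type", "vmType"] (some 10) false := by rw [rowA_eq]; rfl
theorem pvCell4 (m : List (String × String)) :
    (pvExtractRowA m).getD 4 "" = pvCellB m ["private_ip", "privateIp", "private_ip_address"] none false := by rw [rowA_eq]; rfl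

theorem pvFmtRowLit (r0 r1 r2 r3 r4 : String) (w0 w1 w2 w3 w4 : Int) :
    pvFormatRowA [r0, r1, r2, r3, r4] [w0, w1, w2, w3, w4]
      = "| " ++ PySem.Str.join " | " [pvLjust r0 w0, pvLjust r1 w1, pvLjust r2 w2, pvLjust r3 w3, pvLjust r4 w4] ++ " |" := rfl

-- A's row-major body rows re-read column-wise: mapping over the machines equals indexing the
-- five pre-built columns
theorem pvBodyRows {A : Type} (ms : List A) (f0 f1 f2 f3 f4 : A → String) :
    List.map (fun x => "| " ++ PySem.Str.join " | " [f0 x, f1 x, f2 x, f3 x, f4 x] ++ " |") ms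
    = List.map (fun i => "| " ++ PySem.Str.join " | "
        [(List.map f0 ms).getD i "", (List.map f1 ms).getD i "", (List.map f2 ms).getD i "",
         (List.map f3 ms).getD i "", (List.map f4 ms).getD i ""] ++ " |") (List.range ms.length) := by
  refine List.ext_getElem (by simp) ?_
  intro i h1 h2
  have hi : i < ms.length := by simpa using h1
  simp [List.getD_eq_getElem?_getD, hi]

-- ===== VERDICT =====
theorem format_machines_table_spec : Claim_equal_format_machines_table := by
  intro machines _
  unfold Spec_format_machines_table
  by_cases hm : machines = []
  · simp [format_machines_table, format_machines_table_alt, hm]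
  · obtain ⟨m0, ms, rfl⟩ := List.exists_cons_of_ne_nil hm
    simp only [format_machines_table, format_machines_table_alt, pvFormatTableWithHeaders,
      pvSpecsB, pvColB, List.map_cons, List.map_nil, if_neg hm,
      if_neg (show ¬(pvExtractRowA m0 :: ms.map pvExtractRowA = []) from by simp)]
    rw [show (List.range (["ID", "Name", "Status", "Type", "Private IP"] : List String).length) = [0,1,2,3,4] from rfl]
    simp only [List.map_cons, List.map_nil, List.map_map, Function.comp_def,
      List.getD_cons_zero, List.getD_cons_succ,
      pvCell0, pvCell1, pvCell2, pvCell3, pvCell4, pvMaxCons]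
    simp only [pvFormatSepA, List.map_cons, List.map_nil, rowA_eq, pvFmtRowLit,
      List.length_cons]
    rw [List.range_succ_eq_map, List.range_succ_eq_map]
    simp only [List.map_cons, List.map_map, Function.comp_def, List.getD_cons_zero,
      List.getD_cons_succ, List.drop_succ_cons, List.drop_zero]
    refine congrArg (PySem.Str.join "\n") ?_
    simp only [List.cons_append, List.nil_append, List.cons.injEq, true_and,
      List.append_left_inj]
    exact pvBodyRows ms _ _ _ _ _
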